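-- pv_equiv track=rewrite | github.com/poolsidebill/photoStacker | stackPhotos.py | createFileDict
-- ===== SOURCE A (Python) =====
-- def createFileDict(inList, modulus=20):
--     """ Create dictionary from a list of files
--
--     Save contents of entire input file list into a dictionary where each
--     entry has a list of 20 file names. Each dictonary key is a one-up
--     integer value starting from zero.
--
--     Args:
--        inList - list of all file names from current directory to process
--        modulus - number of file names to store in each entry
--     Returns:
--        Dictionary collection of all files to process
--     """
--     listCount = 0  # dictionary key value
--     fileDict = {}
--     list1 = []
--     for index, name in enumerate(inList, start=1):
--         list1.append(name)
--         if index % modulus == 0: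
--             fileDict[listCount]=list1  # store entry list into dictionary
--             listCount+=1
--             list1 = []
--         # handle end of file names that don't land on the modulus
--         if index == len(inList):
--             if len(list1) > 0:  # ensure we have something valid to save
--                 fileDict[listCount]=list1
--
--     return fileDict
-- ===== SOURCE B (Python) =====
-- def createFileDict(inList, modulus=20):
--     """Chunk inList into consecutive sublists of length modulus, keyed 0,1,2,..."""
--     return {key: inList[start:start + modulus]
--             for key, start in enumerate(range(0, len(inList), modulus))}
-- ===== Notes on version B (the rewrite author's own statement) =====
-- stated objective: simpler
-- what changed: B builds the dictionary in one comprehension of slices over chunk-start indices (range(0, len(inList), modulus)), eliminating A's per-element append, modulo counter and end-of-list remainder special case; the C-level slicing also makes it measurably faster by a constant factor.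
-- outside the precondition, e.g. on createFileDict(['a'], -1): A returns {0: ['a']}, B returns {}; on createFileDict([], 0): A returns {}, B raises ValueError
import Mathlib
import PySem

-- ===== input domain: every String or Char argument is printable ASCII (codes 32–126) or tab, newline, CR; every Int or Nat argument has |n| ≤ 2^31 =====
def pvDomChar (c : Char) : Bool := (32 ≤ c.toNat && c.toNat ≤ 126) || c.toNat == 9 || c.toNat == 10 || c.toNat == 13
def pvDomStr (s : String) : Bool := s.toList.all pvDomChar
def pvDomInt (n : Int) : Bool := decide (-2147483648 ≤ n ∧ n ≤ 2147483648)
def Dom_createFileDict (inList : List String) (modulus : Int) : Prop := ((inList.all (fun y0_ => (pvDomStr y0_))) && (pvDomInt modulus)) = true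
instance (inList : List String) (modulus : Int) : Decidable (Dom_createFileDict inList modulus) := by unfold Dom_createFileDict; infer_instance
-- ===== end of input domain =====

-- B replaces A's element-by-element accumulator loop by one pass over chunk-start
-- indices that slices the list; objective: simpler.


-- ===== PORT A =====
-- loop body of A: appends name to list1, flushes a full chunk at index % modulus == 0,
-- and at index == n (the total length) stores a nonempty remainder
def pvAStep (modulus : Int) (n : Int)
    (st : Int × PySem.Dict Int (List String) × List String)
    (p : Int × String) : Int × PySem.Dict Int (List String) × List String :=
  let list1 := st.2.2 ++ [p.2]
  let s2 : Int × PySem.Dict Int (List String) × List String :=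
    if PySem.Int.mod p.1 modulus = 0 then
      (st.1 + 1, (st.2.1).insert st.1 list1, ([] : List String))
    else (st.1, st.2.1, list1)
  if p.1 = n then
    (s2.1, if 0 < s2.2.2.length then (s2.2.1).insert s2.1 s2.2.2 else s2.2.1, s2.2.2)
  else s2

def createFileDict (inList : List String) (modulus : Int) : List (Int × List String) :=
  (((PySem.List.enumerate inList 1).foldl (pvAStep modulus (inList.length : Int))
      (0, PySem.Dict.empty, ([] : List String))).2.1).items

-- ===== PORT B =====
def createFileDict_alt (inList : List String) (modulus : Int) : List (Int × List String) :=
  (((PySem.List.enumerate (PySem.List.pyRange 0 (inList.length : Int) modulus) 0).foldl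
      (fun d p => d.insert p.1 (PySem.List.slice inList (some p.2) (some (p.2 + modulus))))
      PySem.Dict.empty)).items

-- ===== PRECONDITION & SPEC =====
-- Pre_ excludes non-positive modulus on a nonempty list (A raises ZeroDivisionError at
-- modulus 0, and at negative modulus A's modulo test accidentally chunks by |modulus|
-- while B's empty range yields {} — both accidental corner behaviours), and modulus 0 on
-- an empty list, where A's never-entered loop returns {} but B's range step of 0 raises
-- ValueError.
def Pre_createFileDict (inList : List String) (modulus : Int) : Prop :=
  0 < modulus ∨ (inList = [] ∧ modulus ≠ 0)
instance (inList : List String) (modulus : Int) : Decidable (Pre_createFileDict inList modulus) := by unfold Pre_createFileDict; infer_instance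

def pvWitness_createFileDict : List String × Int := (["a", "b", "c"], 2)

def Spec_createFileDict (inList : List String) (modulus : Int) (out : List (Int × List String)) : Prop := out = createFileDict_alt inList modulus
instance (inList : List String) (modulus : Int) (out : List (Int × List String)) : Decidable (Spec_createFileDict inList modulus out) := by unfold Spec_createFileDict; infer_instance

-- ===== CLAIM (what is proved, stated in full; the proofs are below) =====
def Claim_equal_createFileDict : Prop := ∀ (inList : List String) (modulus : Int), Dom_createFileDict inList modulus → Pre_createFileDict inList modulus → Spec_createFileDict inList modulus (createFileDict inList modulus)

-- ===== LEMMAS AND PROOFS =====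

-- common shape of both programs' results: consecutive chunks of size m keyed k, k+1, …
-- (element-at-a-time form, mirroring A's loop; the last element always flushes)
def pvConsume (m : Nat) (k : Int) (acc : List String) : List String → List (Int × List String)
  | [] => []
  | [y] => [(k, acc ++ [y])]
  | y :: z :: ys =>
    if (acc ++ [y]).length = m then (k, acc ++ [y]) :: pvConsume m (k + 1) [] (z :: ys)
    else pvConsume m k (acc ++ [y]) (z :: ys)

lemma pvConsume_go (m : Nat) :
    ∀ (ys acc : List String) (k : Int), ys ≠ [] → acc.length + 1 ≤ m →
      pvConsume m k acc ys
        = (k, acc ++ ys.take (m - acc.length)) :: pvConsume m (k + 1) [] (ys.drop (m - acc.length)) := by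
  intro ys
  induction ys with
  | nil => intro acc k h _; exact absurd rfl h
  | cons y tl ih =>
    intro acc k _ hlen
    match tl with
    | [] =>
      simp only [pvConsume]
      have h1 : 1 ≤ m - acc.length := by omega
      rw [List.take_of_length_le (by simp; omega), List.drop_of_length_le (by simp; omega)]
      simp [pvConsume]
    | z :: ys' =>
      simp only [pvConsume]
      by_cases hfull : (acc ++ [y]).length = m
      · rw [if_pos hfull]
        have : m - acc.length = 1 := by simp at hfull; omega
        rw [this]
        simp
      · rw [if_neg hfull]
        have hlen' : (acc ++ [y]).length + 1 ≤ m := by simp at hfull ⊢; omega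
        rw [ih (acc ++ [y]) k (by simp) hlen']
        have ht : m - acc.length = (m - (acc ++ [y]).length) + 1 := by simp; omega
        rw [ht]
        simp [List.take_succ_cons, List.drop_succ_cons]

lemma pvConsume_chunk (m : Nat) (hm : 1 ≤ m) (ys : List String) (k : Int) (h : ys ≠ []) :
    pvConsume m k [] ys = (k, ys.take m) :: pvConsume m (k + 1) [] (ys.drop m) := by
  simpa using pvConsume_go m ys [] k h (by simp only [List.length_nil]; omega)

-- a dict whose keys are all below k does not contain k
lemma pvFresh (d : PySem.Dict Int (List String)) (k : Int)
    (hk : ∀ p ∈ d.items, p.1 < k) : d.contains k = false := by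
  by_contra h
  have hc : d.contains k = true := by
    cases hcc : d.contains k with
    | false => exact absurd hcc h
    | true => rfl
  have hmem := (PySem.Dict.contains_iff_mem_keys d k).mp hc
  simp only [PySem.Dict.keys, List.mem_map] at hmem
  rcases hmem with ⟨p, hp, hpk⟩
  have := hk p hp
  omega

-- A-side: the fold over the enumerated suffix, with invariants, produces pvConsume
lemma pvFoldA (m : Int) (hm : 0 < m) (n : Int) :
    ∀ (ys : List String) (j k : Int) (d : PySem.Dict Int (List String)) (acc : List String),
      0 ≤ j → n = j + ys.length →
      PySem.Int.mod j m = (acc.length : Int) → (acc.length : Int) < m →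
      (∀ p ∈ d.items, p.1 < k) →
      (((PySem.List.enumerate ys (j + 1)).foldl (pvAStep m n) (k, d, acc)).2.1).items
        = d.items ++ pvConsume m.toNat k acc ys := by
  intro ys
  induction ys with
  | nil => intro j k d acc _ _ _ _ _; simp [PySem.List.enumerate_nil, pvConsume]
  | cons y tl ih =>
    intro j k d acc hj hn hmodj hacc hkeys
    have hemodj : j % m = (acc.length : Int) := by
      rw [← PySem.Int.mod_eq_emod_of_pos hm]; exact hmodj
    have hstep : (j + 1) % m = ((acc.length : Int) + 1) % m := by
      conv_lhs => rw [← Int.mul_ediv_add_emod j m]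
      rw [show m * (j / m) + j % m + 1 = (j % m + 1) + m * (j / m) by ring,
        Int.add_mul_emod_self_left, hemodj]
    rw [PySem.List.enumerate_cons, List.foldl_cons]
    match tl with
    | [] =>
      have hjn : j + 1 = n := by simp at hn; omega
      simp only [PySem.List.enumerate_nil, List.foldl_nil]
      by_cases hdiv : PySem.Int.mod (j + 1) m = 0
      · have hcont := pvFresh d k hkeys
        rw [hjn] at hdiv
        simp only [pvAStep, hdiv, hjn]
        simp [PySem.Dict.items_insert_of_not_contains _ _ hcont, pvConsume]
      · have hcont := pvFresh d k hkeys
        rw [hjn] at hdiv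
        simp only [pvAStep, hdiv, hjn]
        simp [PySem.Dict.items_insert_of_not_contains _ _ hcont, pvConsume]
    | z :: tl' =>
      have hjn : ¬ (j + 1 = n) := by simp at hn; omega
      by_cases hdiv : PySem.Int.mod (j + 1) m = 0
      · -- chunk boundary
        have hemod1 : ((acc.length : Int) + 1) % m = 0 := by
          rw [← hstep, ← PySem.Int.mod_eq_emod_of_pos hm]; exact hdiv
        have hfull : (acc.length : Int) + 1 = m := by
          by_contra hne
          have hlt : (acc.length : Int) + 1 < m := by omega
          rw [Int.emod_eq_of_lt (by omega) hlt] at hemod1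
          omega
        have hcont := pvFresh d k hkeys
        have hitems := PySem.Dict.items_insert_of_not_contains d (acc ++ [y]) hcont
        simp only [pvAStep, hdiv, if_neg hjn]
        simp only [if_true]
        rw [ih (j + 1) (k + 1) (d.insert k (acc ++ [y])) []
          (by omega) (by simp at hn ⊢; omega)
          (by simpa using hdiv) (by simpa using hm)
          (by intro p hp
              rw [hitems] at hp
              rcases List.mem_append.mp hp with h | h
              · have := hkeys p h; omega
              · simp only [List.mem_singleton] at h
                subst h; simp)]
        rw [hitems]
        have hfullN : (acc ++ [y]).length = m.toNat := by simp; omega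
        simp [pvConsume, hfullN, List.append_assoc]
      · have hne : (acc.length : Int) + 1 ≠ m := by
          intro he
          apply hdiv
          rw [PySem.Int.mod_eq_emod_of_pos hm, hstep, he]
          simp
        have hmodnew : PySem.Int.mod (j + 1) m = (((acc ++ [y]).length : Int)) := by
          rw [PySem.Int.mod_eq_emod_of_pos hm, hstep,
            Int.emod_eq_of_lt (by omega) (by omega)]
          simp
        simp only [pvAStep, hdiv, if_neg hjn]
        simp only [if_false]
        rw [ih (j + 1) k d (acc ++ [y])
          (by omega) (by simp at hn ⊢; omega)
          hmodnew (by simp; omega) hkeys]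
        have hneN : ¬ (acc.length + 1 = m.toNat) := by omega
        simp [pvConsume, hneN]

lemma pvA_eq_consume (xs : List String) (m : Int) (hm : 0 < m) :
    createFileDict xs m = pvConsume m.toNat 0 [] xs := by
  unfold createFileDict
  have h := pvFoldA m hm (xs.length : Int) xs 0 0 PySem.Dict.empty []
    (le_refl 0) (by simp)
    (by rw [PySem.Int.mod_eq_emod_of_pos hm]; simp)
    (by simpa using hm)
    (by intro p hp; simp [PySem.Dict.empty] at hp)
  simpa using h

-- B-side helpers
lemma pvEnumerate_map {α β : Type} (f : α → β) :
    ∀ (l : List α) (s : Int),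
      PySem.List.enumerate (l.map f) s = (PySem.List.enumerate l s).map (fun p => (p.1, f p.2)) := by
  intro l
  induction l with
  | nil => intro s; simp [PySem.List.enumerate_nil]
  | cons x xs ih => intro s; simp [PySem.List.enumerate_cons, ih]

lemma pvPyRange_cons (a b s : Int) (hs : 0 < s) (hab : a < b) :
    PySem.List.pyRange a b s = a :: PySem.List.pyRange (a + s) b s := by
  rw [PySem.List.pyRange_of_pos a b hs, PySem.List.pyRange_of_pos (a + s) b hs]
  rw [if_pos hab]
  by_cases h2 : a + s < b
  · rw [if_pos h2]
    have hc : ((b - a + s - 1) / s).toNat = ((b - (a + s) + s - 1) / s).toNat + 1 := by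
      have he : b - a + s - 1 = (b - (a + s) + s - 1) + 1 * s := by ring
      rw [he, Int.add_mul_ediv_right _ _ (by omega : s ≠ 0)]
      have h0 : 0 ≤ (b - (a + s) + s - 1) / s := Int.ediv_nonneg (by omega) (by omega)
      omega
    rw [hc, List.range_succ_eq_map]
    simp [List.map_map, Function.comp]
    intro k _
    ring
  · rw [if_neg h2]
    have h1 : (1 : Int) ≤ (b - a + s - 1) / s := by
      rw [Int.le_ediv_iff_mul_le hs]; omega
    have h2' : (b - a + s - 1) / s < 2 := by
      rw [Int.ediv_lt_iff_lt_mul hs]; omega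
    have hc : ((b - a + s - 1) / s).toNat = 1 := by omega
    rw [hc]
    simp

lemma pvPyRange_nil (a b s : Int) (hs : 0 < s) (hab : b ≤ a) :
    PySem.List.pyRange a b s = [] := by
  rw [PySem.List.pyRange_of_pos a b hs]
  simp [show ¬ a < b by omega]

lemma pvPyRange_shift (a b s c : Int) (hs : 0 < s) :
    PySem.List.pyRange (a + c) (b + c) s = (PySem.List.pyRange a b s).map (· + c) := by
  rw [PySem.List.pyRange_of_pos _ _ hs, PySem.List.pyRange_of_pos _ _ hs]
  have h1 : b + c - (a + c) = b - a := by ring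
  rw [h1]
  have h2 : a + c < b + c ↔ a < b := by omega
  rw [if_congr h2 rfl rfl, List.map_map]
  apply List.map_congr_left; intro k _; simp [Function.comp]; ring

lemma pvSlice_drop (xs : List String) (i m : Int) (hi : 0 ≤ i) (hm : 0 ≤ m) :
    PySem.List.slice xs (some (i + m)) (some (i + m + m))
      = PySem.List.slice (xs.drop m.toNat) (some i) (some (i + m)) := by
  rw [PySem.List.slice_toNat xs (by omega) (by omega),
      PySem.List.slice_toNat _ hi (by omega), List.drop_drop]
  have h1 : m.toNat + i.toNat = (i + m).toNat := by omega
  have h2 : (i + m + m).toNat - (i + m).toNat = (i + m).toNat - i.toNat := by omega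
  rw [h1, h2]

lemma pvChunkB (m : Int) (hm : 0 < m) :
    ∀ (N : Nat) (xs : List String), xs.length ≤ N → ∀ (k : Int),
      (PySem.List.enumerate (PySem.List.pyRange 0 (xs.length : Int) m) k).map
          (fun p => (p.1, PySem.List.slice xs (some p.2) (some (p.2 + m))))
        = pvConsume m.toNat k [] xs := by
  intro N
  induction N with
  | zero =>
    intro xs hlen k
    have : xs = [] := List.length_eq_zero_iff.mp (by omega)
    subst this
    simp [pvPyRange_nil 0 0 m hm (by omega), PySem.List.enumerate_nil, pvConsume]
  | succ N ih =>
    intro xs hlen k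
    by_cases hxs : xs = []
    · subst hxs
      simp [pvPyRange_nil 0 0 m hm (by omega), PySem.List.enumerate_nil, pvConsume]
    · have hn : 0 < xs.length := List.length_pos_iff.mpr hxs
      have hcons := pvPyRange_cons 0 (xs.length : Int) m hm (by exact_mod_cast hn)
      rw [hcons, PySem.List.enumerate_cons]
      rw [pvConsume_chunk m.toNat (by omega) xs k hxs]
      simp only [List.map_cons]
      congr 1
      · -- head
        have : PySem.List.slice xs (some 0) (some (0 + m)) = xs.take m.toNat := by
          rw [zero_add, PySem.List.slice_toNat xs (by omega) (by omega)]
          simp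
        rw [this]
      · -- tail
        set xs' := xs.drop m.toNat with hxs'
        have hlen' : xs'.length ≤ N := by
          simp [hxs', List.length_drop]; omega
        by_cases hcase : (xs.length : Int) ≤ m
        · -- tail range empty
          rw [zero_add, pvPyRange_nil m (xs.length : Int) m hm hcase]
          have : xs' = [] := by
            apply List.eq_nil_of_length_eq_zero
            simp [hxs', List.length_drop]; omega
          rw [this]
          simp [PySem.List.enumerate_nil, pvConsume]
        · -- shift
          have hml : m.toNat ≤ xs.length := by omega
          have hlen'' : (xs'.length : Int) = (xs.length : Int) - m := by
            simp [hxs', List.length_drop]; omega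
          have hsh : PySem.List.pyRange (0 + m) (xs.length : Int) m
              = (PySem.List.pyRange 0 (xs'.length : Int) m).map (· + m) := by
            have h := pvPyRange_shift 0 ((xs.length : Int) - m) m m hm
            rw [zero_add] at h
            have he : ((xs.length : Int) - m) + m = (xs.length : Int) := by ring
            rw [he] at h
            rw [zero_add, h, hlen'']
          rw [hsh, pvEnumerate_map, List.map_map]
          rw [← ih xs' hlen' (k + 1)]
          apply List.map_congr_left
          intro p hp
          have hp2 : p.2 ∈ PySem.List.pyRange 0 (xs'.length : Int) m := by
            rcases (PySem.List.mem_enumerate_iff _ _ _).mp hp with ⟨j, hj, hpj⟩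
            subst hpj
            simp
          have hp2nn : 0 ≤ p.2 := ((PySem.List.mem_pyRange_iff_of_pos hm p.2).mp hp2).1
          simp only [Function.comp]
          have := pvSlice_drop xs p.2 m hp2nn (by omega)
          rw [show p.2 + m + m = (p.2 + m) + m by ring] at this ⊢
          rw [this]

lemma pvB_eq_consume (xs : List String) (m : Int) (hm : 0 < m) :
    createFileDict_alt xs m = pvConsume m.toNat 0 [] xs := by
  unfold createFileDict_alt
  rw [PySem.Dict.items_foldl_insert_fresh
      (PySem.List.enumerate (PySem.List.pyRange 0 (xs.length : Int) m) 0)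
      (fun p => p.1) (fun p => PySem.List.slice xs (some p.2) (some (p.2 + m)))
      PySem.Dict.empty
      (by intro a _; simp [PySem.Dict.contains_empty])
      (by rw [PySem.List.map_fst_enumerate]; exact PySem.List.nodup_pyRange_one _ _)]
  simpa using pvChunkB m hm xs.length xs (le_refl _) 0

-- ===== VERDICT (by name: the statement is the Claim_ definition above) =====
theorem createFileDict_spec : Claim_equal_createFileDict := by
  intro inList modulus _ hpre
  unfold Spec_createFileDict
  rcases hpre with hm | ⟨hnil, hm0⟩
  · rw [pvA_eq_consume inList modulus hm, pvB_eq_consume inList modulus hm]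
  · subst hnil
    simp [createFileDict, createFileDict_alt, PySem.List.pyRange, hm0,
      PySem.List.enumerate, PySem.Dict.empty]
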